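-- pv_equiv track=rewrite | github.com/nimezhu/bam2x | scripts/bam2wigHS.py | ArrayToWig
-- ===== SOURCE A (Python) =====
-- def ArrayToWig(a):
--     state=0
--     start=0
--     stop=0
--     thres=100
--     zero_count=0
--     segment=[]
--     for i,x in enumerate(a):
--         if x>0 and state==0:
--             start=i
--             state=1
--             zero_count=0
--         if x>0 and state==1:
--             stop=i
--             zero_count=0
--         if x==0 and state==0:
--             continue
--         if x==0 and state==1:
--             zero_count+=1
--             if zero_count > thres:
--                 state=0
--                 segment.append((start,stop))
--     if state==1:
--         segment.append((start,stop))
--     return segment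
-- ===== SOURCE B (Python) =====
-- def ArrayToWig(a):
--     # collect positive positions paired with the count of zeros before them
--     pts = []
--     z = 0
--     for i, x in enumerate(a):
--         if x > 0:
--             pts.append((i, z))
--         elif x == 0:
--             z += 1
--     if not pts:
--         return []
--     segs = []
--     start, _ = pts[0]
--     last, zlast = pts[0]
--     for q, zq in pts[1:]:
--         if zq - zlast > 100:
--             segs.append((start, last))
--             start = q
--         last, zlast = q, zq
--     segs.append((start, last))
--     return segs
-- ===== Notes on version B (the rewrite author's own statement) =====
-- stated objective: alternative
-- what changed: Replaces A's five-variable running state machine (state/start/stop/zero_count/segment with in-loop closing) by a two-phase decomposition: one pass collecting (positive index, zeros-before) pairs, then grouping consecutive positives whose in-between zero count is at most 100.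
import Mathlib
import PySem

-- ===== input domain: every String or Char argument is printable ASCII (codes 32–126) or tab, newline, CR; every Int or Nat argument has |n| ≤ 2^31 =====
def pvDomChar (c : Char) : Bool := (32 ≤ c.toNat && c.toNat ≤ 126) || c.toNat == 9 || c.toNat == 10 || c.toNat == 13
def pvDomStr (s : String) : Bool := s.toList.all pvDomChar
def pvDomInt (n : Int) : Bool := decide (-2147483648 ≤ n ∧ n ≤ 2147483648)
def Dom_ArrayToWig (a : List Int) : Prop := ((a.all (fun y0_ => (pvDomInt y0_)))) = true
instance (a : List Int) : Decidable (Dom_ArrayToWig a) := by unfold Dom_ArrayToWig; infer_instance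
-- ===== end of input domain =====

-- B replaces A's five-variable state machine by a different decomposition: one pass collecting
-- (positive index, zeros-before-it) pairs, then grouping consecutive positives whose
-- in-between zero count is ≤ 100 (objective: alternative; same O(n) cost).

-- ===== PORT A =====
-- one iteration of A's for-loop: sequential ifs over (state, start, stop, zero_count, segment)
def stepA (s : Int × Int × Int × Int × List (Int × Int)) (ix : Int × Int) :
    Int × Int × Int × Int × List (Int × Int) :=
  let state := s.1; let start := s.2.1; let stop := s.2.2.1
  let zc := s.2.2.2.1; let seg := s.2.2.2.2
  let i := ix.1; let x := ix.2
  -- if x>0 and state==0: start=i; state=1; zero_count=0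
  let p1 : Int × Int × Int := if x > 0 ∧ state = 0 then (i, 1, 0) else (start, state, zc)
  let start := p1.1; let state := p1.2.1; let zc := p1.2.2
  -- if x>0 and state==1: stop=i; zero_count=0
  let p2 : Int × Int := if x > 0 ∧ state = 1 then (i, 0) else (stop, zc)
  let stop := p2.1; let zc := p2.2
  -- if x==0 and state==0: continue (no-op)
  -- if x==0 and state==1: zero_count+=1; if zero_count>100: state=0; segment.append((start,stop))
  if x = 0 ∧ state = 1 then
    let zc := zc + 1
    if zc > 100 then (0, start, stop, zc, seg ++ [(start, stop)])
    else (state, start, stop, zc, seg)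
  else (state, start, stop, zc, seg)

def ArrayToWig (a : List Int) : List (Int × Int) :=
  let fin := (PySem.List.enumerate a 0).foldl stepA (0, 0, 0, 0, [])
  -- if state==1: segment.append((start,stop))
  if fin.1 = 1 then fin.2.2.2.2 ++ [(fin.2.1, fin.2.2.1)] else fin.2.2.2.2

-- ===== PORT B =====
-- first pass of Source B: collect (index, zeros-so-far) for each positive element
def stepPts (s : List (Int × Int) × Int) (ix : Int × Int) : List (Int × Int) × Int :=
  if ix.2 > 0 then (s.1 ++ [(ix.1, s.2)], s.2)
  else if ix.2 = 0 then (s.1, s.2 + 1) else s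

-- second pass of Source B over pts[1:]: state (segs, start, last, zlast)
def stepSeg (s : List (Int × Int) × Int × Int × Int) (q : Int × Int) :
    List (Int × Int) × Int × Int × Int :=
  if q.2 - s.2.2.2 > 100 then (s.1 ++ [(s.2.1, s.2.2.1)], q.1, q.1, q.2)
  else (s.1, s.2.1, q.1, q.2)

def ArrayToWig_alt (a : List Int) : List (Int × Int) :=
  let pz := (PySem.List.enumerate a 0).foldl stepPts ([], 0)
  match pz.1 with
  | [] => []
  | p0 :: rest =>
    let r := rest.foldl stepSeg ([], p0.1, p0.1, p0.2)
    r.1 ++ [(r.2.1, r.2.2.1)]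

-- ===== PRECONDITION & SPEC =====
def Spec_ArrayToWig (a : List Int) (out : List (Int × Int)) : Prop := out = ArrayToWig_alt a
instance (a : List Int) (out : List (Int × Int)) : Decidable (Spec_ArrayToWig a out) := by unfold Spec_ArrayToWig; infer_instance

-- ===== CLAIM (what is proved, stated in full; the proofs are below) =====
def Claim_equal_ArrayToWig : Prop := ∀ (a : List Int), Dom_ArrayToWig a → Spec_ArrayToWig a (ArrayToWig a)

-- ===== LEMMAS AND PROOFS =====

-- B's second-pass state as a function of the pts list (none = no positives yet)
def Bst (pts : List (Int × Int)) : Option (List (Int × Int) × Int × Int × Int) :=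
  match pts with
  | [] => none
  | p0 :: rest => some (rest.foldl stepSeg ([], p0.1, p0.1, p0.2))

-- the loop invariant relating A's state to B's two passes on the same prefix
def AWRel (sA : Int × Int × Int × Int × List (Int × Int)) (pz : List (Int × Int) × Int) : Prop :=
  (sA.1 = 0 ∧ Bst pz.1 = none ∧ sA.2.2.2.2 = []) ∨
  (sA.1 = 1 ∧ ∃ zl, Bst pz.1 = some (sA.2.2.2.2, sA.2.1, sA.2.2.1, zl) ∧
      pz.2 - zl = sA.2.2.2.1 ∧ sA.2.2.2.1 ≤ 100) ∨
  (sA.1 = 0 ∧ ∃ seg0 st tp zl, Bst pz.1 = some (seg0, st, tp, zl) ∧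
      sA.2.2.2.2 = seg0 ++ [(st, tp)] ∧ pz.2 - zl > 100)

theorem Bst_append (pts : List (Int × Int)) (i z : Int) :
    Bst (pts ++ [(i, z)]) =
      some (match Bst pts with
            | none => ([], i, i, z)
            | some st => stepSeg st (i, z)) := by
  cases pts with
  | nil => simp [Bst]
  | cons p0 rest => simp [Bst, List.foldl_append]

theorem step_rel (sA : Int × Int × Int × Int × List (Int × Int))
    (pz : List (Int × Int) × Int) (ix : Int × Int) (h : AWRel sA pz) :
    AWRel (stepA sA ix) (stepPts pz ix) := by
  obtain ⟨st, s1, s2, zc, seg⟩ := sA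
  obtain ⟨pts, z⟩ := pz
  obtain ⟨i, x⟩ := ix
  rcases h with ⟨h0, hB, hseg⟩ | ⟨h1, zl, hB, hz, hle⟩ | ⟨h0, seg0, a, b, zl, hB, hseg, hgt⟩
  · -- state 0, no positives yet
    simp only at h0 hB hseg; subst h0 hseg
    by_cases hx : x > 0
    · -- opens a new segment
      have hx0 : ¬ x = 0 := by omega
      right; left
      simp only [stepA, stepPts, hx, hx0]
      norm_num
      refine ⟨z, ?_, by norm_num⟩
      rw [Bst_append, hB]
    · by_cases hx0 : x = 0
      · left; simp [stepA, stepPts,  hx0, hB]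
      · left; simp [stepA, stepPts, hx, hx0, hB]
  · -- state 1: segment open
    simp only at h1 hB hz hle; subst h1
    by_cases hx : x > 0
    · -- extend current segment
      have hx0 : ¬ x = 0 := by omega
      have hne : ¬ (z - zl > 100) := by omega
      right; left
      simp only [stepA, stepPts, hx, hx0]
      norm_num
      refine ⟨z, ?_, by norm_num⟩
      rw [Bst_append, hB]
      simp only [stepSeg, hne, if_false]
    · by_cases hx0 : x = 0
      · -- a zero while open
        by_cases hcl : zc + 1 > 100
        · -- closes the segment
          right; right
          simp only [stepA, stepPts,  hx0]
          norm_num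
          rw [if_pos (by omega : (100:Int) ≤ zc)]
          exact ⟨by norm_num, seg, s1, s2, zl, hB, rfl, by omega⟩
        · right; left
          simp only [stepA, stepPts,  hx0]
          norm_num
          rw [if_neg (by omega : ¬ (100:Int) ≤ zc)]
          exact ⟨by norm_num, zl, hB, by simp; omega, by simp; omega⟩
      · -- negative: everything unchanged
        right; left
        simp only [stepA, stepPts, hx, hx0]
        norm_num
        exact ⟨zl, hB, hz, hle⟩
  · -- state 0 after a closed segment
    simp only at h0 hB hseg hgt; subst h0 hseg
    by_cases hx : x > 0
    · -- reopens: B now also closes the pending segment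
      have hx0 : ¬ x = 0 := by omega
      right; left
      simp only [stepA, stepPts, hx, hx0]
      norm_num
      refine ⟨z, ?_, by norm_num⟩
      rw [Bst_append, hB]
      simp only [stepSeg, hgt, if_pos]
    · by_cases hx0 : x = 0
      · right; right
        simp only [stepA, stepPts,  hx0]
        norm_num
        exact ⟨seg0, a, b, zl, hB, ⟨rfl, rfl, rfl⟩, by omega⟩
      · right; right
        simp only [stepA, stepPts, hx, hx0]
        norm_num
        exact ⟨seg0, a, b, zl, hB, ⟨rfl, rfl, rfl⟩, hgt⟩

theorem AW_inv (l : List Int) :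
    AWRel ((PySem.List.enumerate l 0).foldl stepA (0, 0, 0, 0, []))
        ((PySem.List.enumerate l 0).foldl stepPts ([], 0)) := by
  induction l using List.reverseRecOn with
  | nil => left; simp [PySem.List.enumerate, Bst]
  | append_singleton l x ih =>
    rw [PySem.List.enumerate_append]
    simp only [PySem.List.enumerate, List.foldl_append]
    exact step_rel _ _ _ ih

theorem AW_finalize (sA : Int × Int × Int × Int × List (Int × Int))
    (pz : List (Int × Int) × Int) (h : AWRel sA pz) :
    (if sA.1 = 1 then sA.2.2.2.2 ++ [(sA.2.1, sA.2.2.1)] else sA.2.2.2.2) =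
    (match pz.1 with
     | [] => []
     | p0 :: rest =>
       let r := rest.foldl stepSeg ([], p0.1, p0.1, p0.2)
       r.1 ++ [(r.2.1, r.2.2.1)]) := by
  obtain ⟨st, s1, s2, zc, seg⟩ := sA
  obtain ⟨pts, z⟩ := pz
  rcases h with ⟨h0, hB, hseg⟩ | ⟨h1, zl, hB, _, _⟩ | ⟨h0, seg0, u, v, zl, hB, hseg, _⟩
  · simp only at h0 hB hseg
    cases pts with
    | nil => subst hseg; simp [h0]
    | cons p0 rest => simp [Bst] at hB
  · simp only at h1 hB
    cases pts with
    | nil => simp [Bst] at hB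
    | cons p0 rest =>
      obtain ⟨q1, q2⟩ := p0
      simp only [Bst, Option.some.injEq] at hB
      subst h1
      simp [hB]
  · simp only at h0 hB hseg
    cases pts with
    | nil => simp [Bst] at hB
    | cons p0 rest =>
      obtain ⟨q1, q2⟩ := p0
      simp only [Bst, Option.some.injEq] at hB
      subst h0 hseg
      simp [hB]

-- ===== VERDICT (by name: the statement is the Claim_ definition above) =====
theorem ArrayToWig_spec : Claim_equal_ArrayToWig := by
  intro a _
  show ArrayToWig a = ArrayToWig_alt a
  unfold ArrayToWig ArrayToWig_alt
  exact AW_finalize _ _ (AW_inv a)
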